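-- pv_equiv track=rewrite | github.com/dp-wu/AC2-Code-Challenge---DP-WU | mastermind/game.py | color_count
-- ===== SOURCE A (Python) =====
-- def color_count(guess, code):
--     count = dict()
--     result = 0
--     # create a answer dictionary: {color: [codecount, guesscount]}
--     """
--     I think one of the given examples is incorrect:
--     guess = ['R','R','R','B'], code = ['B','I','R','R'], output = 2
--     I believe the result should be 3, because in the description:
--     - A letter that appears more times in guess than it appears in code is counted
--         the number of times it appears in code
--     - A letter that appears fewer times in guess than it appears in code is counted
--         the number of times it appears in guess
--     The 'R' should be counted twice, and the 'B' counted once, total add up to 3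
--     """
--     for i in code:
--         if i in count.keys():
--             count[i][0] += 1
--         else:
--             count[i] = [1, 0]
--     for j in guess:
--         if j in count.keys():
--             count[j][1] += 1
--     # calculate total correct color guessed
--     for k in count.values():
--         result += min(k)
--     return result
-- ===== SOURCE B (Python) =====
-- def color_count(guess, code):
--     g = sorted(guess)
--     c = sorted(code)
--     i = j = result = 0
--     while i < len(g) and j < len(c):
--         if g[i] == c[j]:
--             result += 1
--             i += 1
--             j += 1
--         elif g[i] < c[j]:
--             i += 1
--         else:
--             j += 1
--     return result
-- ===== Notes on version B (the rewrite author's own statement) =====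
-- stated objective: alternative
-- what changed: Replaces A's per-color [codecount,guesscount] dictionary built in three passes by sorting copies of both lists and counting matches with a single two-pointer merge.
import Mathlib
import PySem

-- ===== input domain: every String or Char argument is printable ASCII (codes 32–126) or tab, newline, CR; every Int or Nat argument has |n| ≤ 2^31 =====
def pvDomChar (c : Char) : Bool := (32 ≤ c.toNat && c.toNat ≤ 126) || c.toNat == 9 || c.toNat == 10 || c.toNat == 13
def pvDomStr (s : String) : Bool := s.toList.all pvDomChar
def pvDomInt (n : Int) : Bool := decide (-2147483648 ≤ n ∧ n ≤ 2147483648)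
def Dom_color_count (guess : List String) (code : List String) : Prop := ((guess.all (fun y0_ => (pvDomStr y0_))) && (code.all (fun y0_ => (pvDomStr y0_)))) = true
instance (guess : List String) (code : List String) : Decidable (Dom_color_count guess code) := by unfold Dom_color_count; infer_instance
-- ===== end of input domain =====

-- B replaces A's per-color count dictionary (three passes) by a two-pointer merge of sorted copies; same cost class, alternative algorithm.


-- ===== PORT A =====
-- Python's value list [codecount, guesscount] always has length 2; it is ported as the pair
-- (codecount, guesscount), and min(k) over that 2-list as min k.1 k.2 (exact).
def ccStep1 (d : PySem.Dict String (Int × Int)) (i : String) : PySem.Dict String (Int × Int) :=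
  if d.contains i then d.modify i (0, 0) (fun p => (p.1 + 1, p.2)) else d.insert i (1, 0)

def ccStep2 (d : PySem.Dict String (Int × Int)) (j : String) : PySem.Dict String (Int × Int) :=
  if d.contains j then d.modify j (0, 0) (fun p => (p.1, p.2 + 1)) else d

def color_count (guess : List String) (code : List String) : Int :=
  let count : PySem.Dict String (Int × Int) := PySem.Dict.empty
  let result : Int := 0
  let count := code.foldl ccStep1 count
  let count := guess.foldl ccStep2 count
  count.values.foldl (fun r k => r + min k.1 k.2) result

-- ===== PORT B =====
def ccMerge : List String → List String → Int
  | [], _ => 0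
  | _ :: _, [] => 0
  | x :: xs, y :: ys =>
    if x = y then 1 + ccMerge xs ys
    else if x < y then ccMerge xs (y :: ys)
    else ccMerge (x :: xs) ys
termination_by xs ys => xs.length + ys.length

def color_count_alt (guess : List String) (code : List String) : Int :=
  ccMerge (PySem.List.sorted guess (fun x => x) false) (PySem.List.sorted code (fun x => x) false)

-- ===== PRECONDITION & SPEC =====
def Spec_color_count (guess : List String) (code : List String) (out : Int) : Prop := out = color_count_alt guess code
instance (guess : List String) (code : List String) (out : Int) : Decidable (Spec_color_count guess code out) := by unfold Spec_color_count; infer_instance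

-- ===== CLAIM (what is proved, stated in full; the proofs are below) =====
def Claim_equal_color_count : Prop := ∀ (guess : List String) (code : List String), Dom_color_count guess code → Spec_color_count guess code (color_count guess code)

-- ===== LEMMAS AND PROOFS =====

-- Both sides equal the cardinality of the multiset intersection of guess and code.

-- B side: a two-pointer merge over sorted lists counts the multiset intersection (fuel form).
lemma ccMerge_card : ∀ (n : Nat) (xs ys : List String), xs.length + ys.length ≤ n →
    xs.Pairwise (· ≤ ·) → ys.Pairwise (· ≤ ·) →
    ccMerge xs ys = (((xs : Multiset String) ∩ (ys : Multiset String)).card : Int) := by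
  intro n
  induction n with
  | zero =>
    intro xs ys hlen _ _
    cases xs with
    | nil => simp [ccMerge]
    | cons x xs => simp at hlen
  | succ n ih =>
    intro xs ys hlen hxs hys
    match xs, ys with
    | [], ys => simp [ccMerge]
    | x :: xs, [] => simp [ccMerge]
    | x :: xs, y :: ys =>
      by_cases hxy : x = y
      · subst hxy
        simp only [ccMerge]
        rw [← Multiset.cons_coe, ← Multiset.cons_coe,
            Multiset.cons_inter_of_pos _ (Multiset.mem_cons_self x _),
            Multiset.erase_cons_head, Multiset.card_cons]
        rw [ih xs ys (by simp at hlen ⊢; omega) (List.pairwise_cons.mp hxs).2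
              (List.pairwise_cons.mp hys).2]
        push_cast; ring
      · by_cases hlt : x < y
        · have hnot : x ∉ (y :: ys) := by
            intro hmem
            rcases List.mem_cons.mp hmem with h | h
            · exact hxy h
            · exact absurd ((List.pairwise_cons.mp hys).1 x h) (not_le.mpr hlt)
          simp only [ccMerge, if_neg hxy, if_pos hlt]
          rw [← Multiset.cons_coe, Multiset.cons_inter_of_neg _ (by simpa using hnot)]
          exact ih xs (y :: ys) (by simp at hlen ⊢; omega) (List.pairwise_cons.mp hxs).2 hys
        · have hnot : y ∉ (x :: xs) := by
            intro hmem
            rcases List.mem_cons.mp hmem with h | h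
            · exact hxy h.symm
            · have hle : x ≤ y := (List.pairwise_cons.mp hxs).1 y h
              exact hlt (lt_of_le_of_ne hle hxy)
          simp only [ccMerge, if_neg hxy, if_neg hlt]
          rw [Multiset.inter_comm, ← Multiset.cons_coe,
              Multiset.cons_inter_of_neg _ (by simpa using hnot), Multiset.inter_comm]
          exact ih (x :: xs) ys (by simp at hlen ⊢; omega) hxs (List.pairwise_cons.mp hys).2

lemma ccMerge_eq_card_inter (xs ys : List String)
    (hxs : xs.Pairwise (· ≤ ·)) (hys : ys.Pairwise (· ≤ ·)) :
    ccMerge xs ys = (((xs : Multiset String) ∩ (ys : Multiset String)).card : Int) :=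
  ccMerge_card (xs.length + ys.length) xs ys le_rfl hxs hys

-- A side, loop 1: keys are the distinct colors of the processed list, values (count, 0).
lemma ccLoop1 (l : List String) :
    (l.foldl ccStep1 PySem.Dict.empty).keys = PySem.Set.ofList l ∧
    (l.foldl ccStep1 PySem.Dict.empty).keys.Nodup ∧
    ∀ c, (l.foldl ccStep1 PySem.Dict.empty).getD c (0, 0) = ((l.count c : Int), 0) := by
  induction l using List.reverseRecOn with
  | nil =>
    refine ⟨?_, ?_, ?_⟩ <;> simp [PySem.Dict.keys_empty, PySem.Dict.getD_empty]
  | append_singleton l i ih =>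
    obtain ⟨hk, hnd, hg⟩ := ih
    simp only [List.foldl_append, List.foldl_cons, List.foldl_nil]
    set d := l.foldl ccStep1 PySem.Dict.empty with hd
    by_cases hmem : i ∈ l
    · have hc : d.contains i = true := by
        rw [PySem.Dict.contains_eq_decide_mem_keys, hk]
        simp [PySem.Set.mem_ofList, hmem]
      simp only [ccStep1, hc, if_true]
      refine ⟨?_, ?_, ?_⟩
      · rw [PySem.Dict.keys_modify, PySem.Dict.keys_insert_of_contains _ _ hc, hk,
            PySem.Set.ofList_append_singleton,
            PySem.Set.add_of_mem (by simp [PySem.Set.mem_ofList, hmem])]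
      · rw [PySem.Dict.keys_modify, PySem.Dict.keys_insert_of_contains _ _ hc]; exact hnd
      · intro c
        rw [PySem.Dict.getD_modify]
        by_cases hci : c = i
        · subst hci
          simp [hg, List.count_append]
        · simp [hci, hg, List.count_append, Ne.symm hci]
    · have hc : d.contains i = false := by
        rw [PySem.Dict.contains_eq_decide_mem_keys, hk]
        simp [PySem.Set.mem_ofList, hmem]
      simp only [ccStep1, hc, Bool.false_eq_true, if_false]
      refine ⟨?_, ?_, ?_⟩
      · rw [PySem.Dict.keys_insert_of_not_contains _ _ hc, hk,
            PySem.Set.ofList_append_singleton,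
            PySem.Set.add_of_not_mem (by simp [PySem.Set.mem_ofList, hmem])]
      · exact PySem.Dict.nodup_keys_insert _ _ _ hnd
      · intro c
        rw [PySem.Dict.getD_insert]
        by_cases hci : c = i
        · subst hci
          have hcnt : l.count c = 0 := List.count_eq_zero.mpr hmem
          simp [hcnt, List.count_append]
        · simp [hci, hg, List.count_append, Ne.symm hci]

-- A side, loop 2: the key list never changes.
lemma ccStep2_keys (d : PySem.Dict String (Int × Int)) (j : String) :
    (ccStep2 d j).keys = d.keys := by
  cases hcj : d.contains j
  · simp only [ccStep2, hcj, Bool.false_eq_true, if_false]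
  · simp only [ccStep2, hcj, if_true]
    exact PySem.Dict.keys_insert_of_contains _ _ hcj

lemma ccLoop2_keys : ∀ (g : List String) (d : PySem.Dict String (Int × Int)),
    (g.foldl ccStep2 d).keys = d.keys := by
  intro g
  induction g with
  | nil => intro d; rfl
  | cons j g ih =>
    intro d
    rw [List.foldl_cons, ih, ccStep2_keys]

-- A side, loop 2: second components accumulate guess counts of existing keys.
lemma ccLoop2_getD : ∀ (g : List String) (d : PySem.Dict String (Int × Int)) (c : String),
    (g.foldl ccStep2 d).getD c (0, 0) =
      ((d.getD c (0, 0)).1,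
       (d.getD c (0, 0)).2 + (if d.contains c = true then (g.count c : Int) else 0)) := by
  intro g
  induction g with
  | nil =>
    intro d c
    cases h : d.contains c <;> simp
  | cons j g ih =>
    intro d c
    rw [List.foldl_cons, ih]
    have hcont : (ccStep2 d j).contains c = d.contains c := by
      rw [PySem.Dict.contains_eq_decide_mem_keys, PySem.Dict.contains_eq_decide_mem_keys,
          ccStep2_keys]
    rw [hcont]
    cases hcj : d.contains j
    · simp only [ccStep2, hcj, Bool.false_eq_true, if_false]
      by_cases hc : c = j
      · subst hc
        simp [hcj]
      · have hcount : List.count c (j :: g) = List.count c g := by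
          simp [Ne.symm hc]
        rw [hcount]
    · simp only [ccStep2, hcj, if_true]
      rw [PySem.Dict.getD_modify]
      by_cases hc : c = j
      · subst hc
        simp [hcj, List.count_cons_self, Prod.ext_iff]
        omega
      · have hcount : List.count c (j :: g) = List.count c g := by
          simp [Ne.symm hc]
        simp [hc, hcount]

-- arithmetic bridge: per-color minima over the distinct colors of code sum to the intersection card
lemma sum_min_eq_card_inter (guess code : List String) :
    ((PySem.Set.ofList code).map
        (fun c => min ((code.count c : Int)) ((guess.count c : Int)))).sum =
      (((guess : Multiset String) ∩ (code : Multiset String)).card : Int) := by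
  classical
  have hnat : ((PySem.Set.ofList code).map
      (fun c => min (code.count c) (guess.count c))).sum =
      ((guess : Multiset String) ∩ (code : Multiset String)).card := by
    have hfs : (PySem.Set.ofList code).toFinset = code.toFinset := by
      ext a; simp [List.mem_toFinset, PySem.Set.mem_ofList]
    have hsub : ((guess : Multiset String) ∩ (code : Multiset String)).toFinset ⊆ code.toFinset := by
      intro a ha
      simp only [Multiset.mem_toFinset] at ha
      have : a ∈ (code : Multiset String) :=
        Multiset.mem_of_le Multiset.inter_le_right ha
      simpa [List.mem_toFinset] using this
    have hcnt : ∀ a, Multiset.count a ((guess : Multiset String) ∩ (code : Multiset String))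
        = min (code.count a) (guess.count a) := by
      intro a
      rw [Multiset.count_inter]
      simp [min_comm]
    calc ((PySem.Set.ofList code).map (fun c => min (code.count c) (guess.count c))).sum
        = (PySem.Set.ofList code).toFinset.sum (fun c => min (code.count c) (guess.count c)) :=
          (List.sum_toFinset _ (PySem.Set.nodup_ofList code)).symm
      _ = code.toFinset.sum (fun c => min (code.count c) (guess.count c)) := by rw [hfs]
      _ = code.toFinset.sum
            (fun c => Multiset.count c ((guess : Multiset String) ∩ (code : Multiset String))) :=
          Finset.sum_congr rfl (fun a _ => (hcnt a).symm)
      _ = (((guess : Multiset String) ∩ (code : Multiset String)).toFinset).sum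
            (fun c => Multiset.count c ((guess : Multiset String) ∩ (code : Multiset String))) := by
          refine (Finset.sum_subset hsub ?_).symm
          intro x _ hx
          simp only [Multiset.mem_toFinset] at hx
          exact Multiset.count_eq_zero.mpr hx
      _ = ((guess : Multiset String) ∩ (code : Multiset String)).card :=
          Multiset.toFinset_sum_count_eq _
  have hcast : (fun c => min ((code.count c : Int)) ((guess.count c : Int)))
      = (fun c => ((min (code.count c) (guess.count c) : Nat) : Int)) := by
    funext c; exact (Nat.cast_min _ _).symm
  rw [hcast, ← hnat, Nat.cast_list_sum, List.map_map]
  rfl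

lemma color_count_eq_card (guess code : List String) :
    color_count guess code = (((guess : Multiset String) ∩ (code : Multiset String)).card : Int) := by
  unfold color_count
  show List.foldl (fun r k => r + min k.1 k.2) 0
      (List.foldl ccStep2 (List.foldl ccStep1 PySem.Dict.empty code) guess).values =
    (((guess : Multiset String) ∩ (code : Multiset String)).card : Int)
  obtain ⟨hk1, hnd1, hg1⟩ := ccLoop1 code
  set d1 := code.foldl ccStep1 PySem.Dict.empty with hd1
  set d2 := guess.foldl ccStep2 d1 with hd2
  have hk2 : d2.keys = PySem.Set.ofList code := by rw [hd2, ccLoop2_keys, hk1]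
  have hnd2 : d2.keys.Nodup := by rw [hk2]; exact PySem.Set.nodup_ofList code
  have hg2 : ∀ c ∈ code, d2.getD c (0, 0) = ((code.count c : Int), (guess.count c : Int)) := by
    intro c hc
    have hcont : d1.contains c = true := by
      rw [PySem.Dict.contains_eq_decide_mem_keys, hk1]
      simp [PySem.Set.mem_ofList, hc]
    rw [hd2, ccLoop2_getD, hg1, hcont]
    simp
  rw [PySem.Dict.values_eq_map_keys d2 hnd2 (0, 0),
      PySem.List.foldl_add, List.map_map, hk2]
  have hmap : (PySem.Set.ofList code).map
        ((fun k : Int × Int => min k.1 k.2) ∘ (fun k => d2.getD k (0, 0)))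
      = (PySem.Set.ofList code).map
        (fun c => min ((code.count c : Int)) ((guess.count c : Int))) := by
    refine List.map_congr_left (fun c hc => ?_)
    have hcc : c ∈ code := (PySem.Set.mem_ofList _ _).mp hc
    simp [Function.comp, hg2 c hcc]
  rw [hmap, sum_min_eq_card_inter]
  exact zero_add _

lemma color_count_alt_eq_card (guess code : List String) :
    color_count_alt guess code = (((guess : Multiset String) ∩ (code : Multiset String)).card : Int) := by
  unfold color_count_alt
  rw [ccMerge_eq_card_inter _ _ (PySem.List.sorted_pairwise guess (fun x => x))
        (PySem.List.sorted_pairwise code (fun x => x))]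
  rw [Multiset.coe_eq_coe.mpr (PySem.List.sorted_perm guess (fun x => x) false),
      Multiset.coe_eq_coe.mpr (PySem.List.sorted_perm code (fun x => x) false)]

-- ===== VERDICT (by name: the statement is the Claim_ definition above) =====
theorem color_count_spec : Claim_equal_color_count := by
  intro guess code _
  unfold Spec_color_count
  rw [color_count_eq_card, color_count_alt_eq_card]
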